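-- pv_equiv track=rewrite | github.com/tom68-ll/LECSP | embedding_cluster/step1_generate_VALUES.py | find_nested_parentheses_content
-- ===== SOURCE A (Python) =====
-- def find_nested_parentheses_content(text):
--     stack = []
--     result = []
--     temp = ""
--
--     for char in text:
--         if char == '(':
--
--             if stack:
--                 temp += char
--             stack.append(char)
--         elif char == ')' and stack:
--
--             stack.pop()
--
--             if stack:
--                 temp += char
--             else:
--
--                 result.append(temp)
--                 temp = ""
--         elif stack:
--
--             temp += char
--
--     return result
-- ===== SOURCE B (Python) =====
-- def find_nested_parentheses_content(text):
--     # Depth counter + start-index tracking; outermost groups are cut out of the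
--     # original string by slicing instead of accumulating characters one by one.
--     result = []
--     depth = 0
--     start = 0
--     for i, ch in enumerate(text):
--         if ch == '(':
--             if depth == 0:
--                 start = i
--             depth += 1
--         elif ch == ')' and depth > 0:
--             depth -= 1
--             if depth == 0:
--                 result.append(text[start + 1:i])
--     return result
-- ===== Notes on version B (the rewrite author's own statement) =====
-- stated objective: simpler
-- what changed: Replaces the char-stack plus per-character temp string accumulation with a single integer depth counter and a start index, slicing each outermost group out of the original string when depth returns to zero.
import Mathlib
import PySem

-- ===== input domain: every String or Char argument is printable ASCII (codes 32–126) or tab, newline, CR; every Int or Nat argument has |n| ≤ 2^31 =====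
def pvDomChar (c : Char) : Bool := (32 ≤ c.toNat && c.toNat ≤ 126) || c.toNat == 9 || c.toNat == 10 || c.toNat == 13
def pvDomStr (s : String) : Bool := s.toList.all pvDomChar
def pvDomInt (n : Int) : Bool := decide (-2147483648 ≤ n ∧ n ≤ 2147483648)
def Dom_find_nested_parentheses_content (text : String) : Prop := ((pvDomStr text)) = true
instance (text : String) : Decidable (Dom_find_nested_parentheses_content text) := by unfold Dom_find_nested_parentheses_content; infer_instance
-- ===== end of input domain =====

-- B replaces A's char-stack and per-character temp-string accumulation by an integer
-- depth counter plus a start index, slicing each outermost group out of the original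
-- string; objective: simpler. Both programs are total; the return values agree everywhere.

-- ===== PORT A =====
-- A's loop: stack of '(' chars, temp accumulator (as List Char; appended as a String
-- when a group closes), result list appended in order.
def pvGoA : List Char → List Char → List Char → List String → List String
  | [], _stack, _temp, res => res
  | c :: cs, stack, temp, res =>
    if c = '(' then
      -- if stack: temp += char; stack.append(char)
      pvGoA cs (c :: stack) (if stack ≠ [] then temp ++ [c] else temp) res
    else if c = ')' ∧ stack ≠ [] then
      -- stack.pop(); if stack: temp += char else: result.append(temp); temp = ""
      if stack.tail ≠ [] then pvGoA cs stack.tail (temp ++ [c]) res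
      else pvGoA cs stack.tail [] (res ++ [String.ofList temp])
    else if stack ≠ [] then
      pvGoA cs stack (temp ++ [c]) res
    else
      pvGoA cs stack temp res

def find_nested_parentheses_content (text : String) : List String :=
  pvGoA text.toList [] [] []

-- ===== PORT B =====
-- B's loop: enumerate(text) as a char list with a running index i; integer depth,
-- start index of the current outermost '('; text[start+1:i] via PySem.List.slice.
def pvGoB (full : List Char) : List Char → Nat → Nat → Nat → List String → List String
  | [], _i, _depth, _start, res => res
  | c :: cs, i, depth, start, res =>
    if c = '(' then
      pvGoB full cs (i + 1) (depth + 1) (if depth = 0 then i else start) res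
    else if c = ')' ∧ 0 < depth then
      if depth - 1 = 0 then
        pvGoB full cs (i + 1) (depth - 1) start
          (res ++ [String.ofList (PySem.List.slice full (some ((start + 1 : Nat) : Int)) (some ((i : Nat) : Int)))])
      else
        pvGoB full cs (i + 1) (depth - 1) start res
    else
      pvGoB full cs (i + 1) depth start res

def find_nested_parentheses_content_alt (text : String) : List String :=
  pvGoB text.toList text.toList 0 0 0 []

-- ===== PRECONDITION & SPEC =====
def Spec_find_nested_parentheses_content (text : String) (out : List String) : Prop := out = find_nested_parentheses_content_alt text
instance (text : String) (out : List String) : Decidable (Spec_find_nested_parentheses_content text out) := by unfold Spec_find_nested_parentheses_content; infer_instance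

-- ===== CLAIM (what is proved, stated in full; the proofs are below) =====
def Claim_equal_find_nested_parentheses_content : Prop := ∀ (text : String), Dom_find_nested_parentheses_content text → Spec_find_nested_parentheses_content text (find_nested_parentheses_content text)

-- ===== LEMMAS AND PROOFS =====

-- Loop invariant: A's temp is exactly the slice of `full` from start+1 to the
-- current index i whenever the stack is nonempty, and temp = [] when it is empty;
-- B carries stack.length as depth.
lemma pvGo_eq (full : List Char) :
    ∀ (rest : List Char) (i : Nat) (stack temp : List Char) (start : Nat) (res : List String),
      rest = full.drop i →
      (stack = [] → temp = []) →
      (stack ≠ [] → start + 1 ≤ i ∧ temp = (full.take i).drop (start + 1)) →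
      pvGoA rest stack temp res = pvGoB full rest i stack.length start res := by
  intro rest
  induction rest with
  | nil => intro i stack temp start res _ _ _; simp [pvGoA, pvGoB]
  | cons c cs ih =>
    intro i stack temp start res hrest h1 h2
    have hi : i < full.length := by
      by_contra h
      have h' : full.drop i = [] := List.drop_eq_nil_of_le (by omega)
      have := hrest.trans h'
      simp at this
    have hcs : cs = full.drop (i + 1) := by
      have h := congrArg List.tail hrest
      simpa [List.tail_drop] using h
    have hget : full[i]? = some c := by
      have h := congrArg (fun l : List Char => l[0]?) hrest
      simpa using h.symm
    have htake : full.take (i + 1) = full.take i ++ [c] := by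
      rw [List.take_add_one, hget]; rfl
    have hlen_take : (full.take i).length = i := by
      simp [List.length_take]; omega
    -- appending full[i] = c extends the accumulated slice by one character
    have hext : stack ≠ [] → temp ++ [c] = (full.take (i + 1)).drop (start + 1) := by
      intro hs
      obtain ⟨hle, htemp⟩ := h2 hs
      rw [htake, List.drop_append_of_le_length (by omega), htemp]
    by_cases hc : c = '('
    · -- '(' branch
      subst hc
      by_cases hs : stack = []
      · subst hs
        have ht : temp = [] := h1 rfl
        subst ht
        simp only [pvGoA, pvGoB, List.length_nil, ne_eq, not_true_eq_false, if_false, if_true]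
        rw [ih (i + 1) ['('] [] i res (by simpa using hcs)
            (by intro h; rfl)
            (by intro _
                refine ⟨le_refl _, ?_⟩
                exact (List.drop_eq_nil_of_le (List.length_take_le _ _)).symm)]
        simp
      · have hlen : stack.length ≠ 0 := by simpa [List.length_eq_zero_iff] using hs
        simp only [pvGoA, pvGoB, ne_eq, hs, not_false_eq_true, if_true, if_neg hlen]
        exact ih (i + 1) ('(' :: stack) (temp ++ ['(']) start res (by simpa using hcs)
          (by intro h; exact absurd h (by simp))
          (by intro _
              obtain ⟨hle, _⟩ := h2 hs
              exact ⟨by omega, hext hs⟩)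
    · by_cases hcp : c = ')' ∧ stack ≠ []
      · -- ')' with nonempty stack: pop
        obtain ⟨hc', hs⟩ := hcp
        subst hc'
        obtain ⟨s, ss, rfl⟩ := List.exists_cons_of_ne_nil hs
        by_cases hss : ss = []
        · -- depth returns to 0: A appends temp, B appends the slice
          subst hss
          obtain ⟨hle, htemp⟩ := h2 hs
          have hslice : PySem.List.slice full (some ((start + 1 : Nat) : Int)) (some ((i : Nat) : Int))
              = temp := by
            rw [PySem.List.slice_natCast, htemp, List.drop_take]
          simp only [pvGoA, pvGoB, if_neg hc, ne_eq, List.tail_cons, not_true_eq_false,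
            if_false, List.length_cons, List.length_nil, Nat.zero_add, hslice]
          have hres := ih (i + 1) [] [] start (res ++ [String.ofList temp])
            (by simpa using hcs) (fun _ => rfl) (fun h => absurd rfl h)
          simp only [List.length_nil] at hres
          simpa [hc] using hres
        · have hlen : ss.length ≠ 0 := by simpa [List.length_eq_zero_iff] using hss
          have hres := ih (i + 1) ss (temp ++ [')']) start res (by simpa using hcs)
            (fun h => absurd h hss)
            (fun _ => ⟨by obtain ⟨hle, _⟩ := h2 hs; omega, hext hs⟩)
          simp only [pvGoA, pvGoB, if_neg hc, ne_eq, List.tail_cons, hss,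
            not_false_eq_true, if_true, List.length_cons, Nat.add_sub_cancel, if_neg hlen]
          simpa [hc, hlen] using hres
      · -- other char, or unmatched ')' at depth 0: both skip or both accumulate
        have hcondB : ¬ ((c = ')') ∧ 0 < stack.length) := by
          intro h
          exact hcp ⟨h.1, by simpa [List.length_pos_iff_ne_nil] using h.2⟩
        by_cases hs : stack = []
        · subst hs
          have hres := ih (i + 1) [] temp start res (by simpa using hcs) h1
            (fun h => absurd rfl h)
          simp only [List.length_nil] at hres ⊢
          simpa [pvGoA, pvGoB, hc, hcp, hcondB] using hres
        · have hc2 : ¬ c = ')' := fun h => hcp ⟨h, hs⟩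
          have hres := ih (i + 1) stack (temp ++ [c]) start res (by simpa using hcs)
            (fun h => absurd h hs)
            (fun _ => ⟨by obtain ⟨hle, _⟩ := h2 hs; omega, hext hs⟩)
          simpa [pvGoA, pvGoB, hc, hc2, hcondB, hs] using hres

-- ===== VERDICT (by name: the statement is the Claim_ definition above) =====
theorem find_nested_parentheses_content_spec : Claim_equal_find_nested_parentheses_content := by
  intro text _
  unfold Spec_find_nested_parentheses_content find_nested_parentheses_content find_nested_parentheses_content_alt
  exact pvGo_eq text.toList text.toList 0 [] [] 0 [] (by simp) (fun _ => rfl)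
    (fun h => absurd rfl h)
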